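-- pv_equiv track=rewrite | github.com/LucasStevenson/Advent-of-Code | 2024/day02/first.py | isGoodLine
-- ===== SOURCE A (Python) =====
-- def isGoodLine(line):
--     sign = line[1]-line[0] < 0
--     for i in range(len(line)-1):
--         if not (1 <= abs(line[i+1]-line[i]) <= 3):
--             return False
--         if (line[i+1]-line[i] < 0) != sign:
--             return False
--     return True
-- ===== SOURCE B (Python) =====
-- def isGoodLine(line):
--     diffs = [b - a for a, b in zip(line, line[1:])]
--     lo = min(diffs)
--     hi = max(diffs)
--     return (1 <= lo and hi <= 3) or (-3 <= lo and hi <= -1)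
-- ===== Notes on version B (the rewrite author's own statement) =====
-- stated objective: simpler
-- what changed: Replaces the fused early-return index loop (with a separately tracked sign flag) by building the adjacent-difference list once and a closed-form range check on its min and max: all diffs in [1,3] or all in [-3,-1].
import Mathlib
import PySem

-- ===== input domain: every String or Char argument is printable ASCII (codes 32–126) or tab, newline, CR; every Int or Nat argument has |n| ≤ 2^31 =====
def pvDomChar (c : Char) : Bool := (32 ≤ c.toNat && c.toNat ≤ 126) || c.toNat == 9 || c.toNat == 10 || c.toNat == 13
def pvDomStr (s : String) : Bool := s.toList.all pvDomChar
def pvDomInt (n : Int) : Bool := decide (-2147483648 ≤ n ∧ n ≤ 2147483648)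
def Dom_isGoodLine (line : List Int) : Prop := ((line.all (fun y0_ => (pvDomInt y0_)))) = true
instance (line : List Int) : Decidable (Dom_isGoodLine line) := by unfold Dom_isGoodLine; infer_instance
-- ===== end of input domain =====

-- B replaces A's fused early-return index loop (with a tracked sign flag) by building the
-- adjacent-difference list once and a closed-form range check on its min and max (objective: simpler).

-- ===== PORT A =====
-- the 'for i in range(len(line)-1)' loop with its two early returns
def isGoodLineLoop (line : List Int) (sign : Bool) : List Int → Bool
  | [] => true
  | i :: is =>
    if ¬ (1 ≤ |PySem.List.pyGetD line (i+1) 0 - PySem.List.pyGetD line i 0| ∧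
           |PySem.List.pyGetD line (i+1) 0 - PySem.List.pyGetD line i 0| ≤ 3) then false
    else if decide (PySem.List.pyGetD line (i+1) 0 - PySem.List.pyGetD line i 0 < 0) ≠ sign then false
    else isGoodLineLoop line sign is

def isGoodLine (line : List Int) : Bool :=
  let sign := decide (PySem.List.pyGetD line 1 0 - PySem.List.pyGetD line 0 0 < 0)
  isGoodLineLoop line sign (PySem.List.pyRange 0 ((line.length : Int) - 1))

-- ===== PORT B =====
def isGoodLine_alt (line : List Int) : Bool :=
  let diffs := (line.zip (PySem.List.slice line (some 1) none)).map (fun p => p.2 - p.1)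
  match PySem.List.min? diffs (fun x => x), PySem.List.max? diffs (fun x => x) with
  | some lo, some hi => decide ((1 ≤ lo ∧ hi ≤ 3) ∨ (-3 ≤ lo ∧ hi ≤ -1))
  | _, _ => false  -- diffs = []: Python B raises ValueError here (outside Pre_), as A raises IndexError

-- ===== PRECONDITION & SPEC =====
-- A evaluates line[1]-line[0] first: it raises IndexError exactly when len(line) < 2.
def Pre_isGoodLine (line : List Int) : Prop := 2 ≤ line.length
instance (line : List Int) : Decidable (Pre_isGoodLine line) := by unfold Pre_isGoodLine; infer_instance
def pvWitness_isGoodLine : List Int := [1, 2]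

def Spec_isGoodLine (line : List Int) (out : Bool) : Prop := out = isGoodLine_alt line
instance (line : List Int) (out : Bool) : Decidable (Spec_isGoodLine line out) := by unfold Spec_isGoodLine; infer_instance

-- ===== CLAIM (what is proved, stated in full; the proofs are below) =====
def Claim_equal_isGoodLine : Prop := ∀ (line : List Int), Dom_isGoodLine line → Pre_isGoodLine line → Spec_isGoodLine line (isGoodLine line)

-- ===== LEMMAS AND PROOFS =====

-- the loop with early returns is an 'all' over the index list
theorem loop_eq_all (line : List Int) (sign : Bool) (idxs : List Int) :
    isGoodLineLoop line sign idxs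
      = idxs.all (fun i =>
          decide (1 ≤ |PySem.List.pyGetD line (i+1) 0 - PySem.List.pyGetD line i 0| ∧
                  |PySem.List.pyGetD line (i+1) 0 - PySem.List.pyGetD line i 0| ≤ 3) &&
          (decide (PySem.List.pyGetD line (i+1) 0 - PySem.List.pyGetD line i 0 < 0) == sign)) := by
  induction idxs with
  | nil => rfl
  | cons i is ih =>
    rw [isGoodLineLoop, List.all_cons, ih]
    by_cases h1 : (1 ≤ |PySem.List.pyGetD line (i+1) 0 - PySem.List.pyGetD line i 0| ∧
           |PySem.List.pyGetD line (i+1) 0 - PySem.List.pyGetD line i 0| ≤ 3)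
    · rw [if_neg (not_not_intro h1), decide_eq_true h1]
      by_cases h2 : decide (PySem.List.pyGetD line (i+1) 0 - PySem.List.pyGetD line i 0 < 0) = sign
      · rw [if_neg (not_not_intro h2), h2]
        simp
      · rw [if_pos h2, beq_eq_false_iff_ne.mpr h2]
        simp
    · rw [if_pos h1, decide_eq_false h1]
      simp

-- A = true iff every adjacent difference is in [1,3] ∪ [-3,-1] and matches the first sign
theorem A_iff (line : List Int) (h : 2 ≤ line.length) :
    isGoodLine line = true ↔
      ∀ i : Nat, i + 1 < line.length →
        (1 ≤ abs ((getElem! line (i+1)) - (getElem! line (i))) ∧ abs ((getElem! line (i+1)) - (getElem! line (i))) ≤ 3) ∧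
        (decide ((getElem! line (i+1)) - (getElem! line (i)) < 0)
          = decide ((getElem! line (1)) - (getElem! line (0)) < 0)) := by
  simp only [isGoodLine, loop_eq_all, List.all_eq_true]
  constructor
  · intro hA i hi
    have h0 : (0:Int) ≤ (i:Int) := Int.natCast_nonneg i
    have hmem : (i:Int) ∈ PySem.List.pyRange 0 ((line.length : Int) - 1) := by
      rw [PySem.List.mem_pyRange_one]; omega
    have := hA _ hmem
    simp only [Bool.and_eq_true, decide_eq_true_eq, beq_iff_eq] at this
    rw [PySem.List.pyGetD_eq_getElem line 0 (by omega) (by omega),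
        PySem.List.pyGetD_eq_getElem line 0 (by omega) (by omega),
        PySem.List.pyGetD_eq_getElem line 0 (by omega) (by omega),
        PySem.List.pyGetD_eq_getElem line 0 (by omega) (by omega)] at this
    have e1 : ((i:Int)+1).toNat = i+1 := by omega
    have e0 : ((i:Int)).toNat = i := by omega
    have w1 : ((1:Int)).toNat = 1 := by omega
    have w0 : ((0:Int)).toNat = 0 := by omega
    simp only [e1, e0, w1, w0] at this
    rw [getElem!_pos line (i+1) hi, getElem!_pos line i (by omega),
        getElem!_pos line 1 (by omega), getElem!_pos line 0 (by omega)]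
    exact this
  · intro hB x hx
    rw [PySem.List.mem_pyRange_one] at hx
    obtain ⟨hx0, hx1⟩ := hx
    obtain ⟨i, rfl⟩ : ∃ i : Nat, x = (i:Int) := ⟨x.toNat, by omega⟩
    have hi : i + 1 < line.length := by omega
    have := hB i hi
    rw [getElem!_pos line (i+1) hi, getElem!_pos line i (by omega),
        getElem!_pos line 1 (by omega), getElem!_pos line 0 (by omega)] at this
    simp only [Bool.and_eq_true, decide_eq_true_eq, beq_iff_eq]
    rw [PySem.List.pyGetD_eq_getElem line 0 (by omega) (by omega),
        PySem.List.pyGetD_eq_getElem line 0 (by omega) (by omega),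
        PySem.List.pyGetD_eq_getElem line 0 (by omega) (by omega),
        PySem.List.pyGetD_eq_getElem line 0 (by omega) (by omega)]
    have e1 : ((i:Int)+1).toNat = i+1 := by omega
    have e0 : ((i:Int)).toNat = i := by omega
    have w1 : ((1:Int)).toNat = 1 := by omega
    have w0 : ((0:Int)).toNat = 0 := by omega
    simp only [e1, e0, w1, w0]
    exact this

-- membership in the diffs list is exactly "some adjacent difference"
theorem mem_diffs (line : List Int) (d : Int) :
    d ∈ (line.zip (PySem.List.slice line (some 1) none)).map (fun p => p.2 - p.1) ↔
      ∃ i : Nat, i + 1 < line.length ∧ d = (getElem! line (i+1)) - (getElem! line (i)) := by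
  rw [PySem.List.slice_from line (by omega)]
  have ht : ((1:Int)).toNat = 1 := rfl
  rw [ht, List.mem_map]
  constructor
  · rintro ⟨p, hp, rfl⟩
    rw [List.mem_iff_getElem] at hp
    obtain ⟨i, hilen, hpi⟩ := hp
    have hlen : i + 1 < line.length := by
      rw [List.length_zip, List.length_drop] at hilen
      omega
    refine ⟨i, hlen, ?_⟩
    rw [← hpi, List.getElem_zip]
    simp only [List.getElem_drop]
    rw [getElem!_pos line (i+1) hlen, getElem!_pos line i (by omega)]
    have e : 1 + i = i + 1 := Nat.add_comm 1 i
    simp only [e]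
  · rintro ⟨i, hlen, rfl⟩
    refine ⟨(getElem! line i, getElem! line (i+1)), ?_, rfl⟩
    rw [List.mem_iff_getElem]
    have hz : i < (line.zip (List.drop 1 line)).length := by
      rw [List.length_zip, List.length_drop]; omega
    refine ⟨i, hz, ?_⟩
    rw [List.getElem_zip]
    simp only [List.getElem_drop]
    rw [getElem!_pos line (i+1) hlen, getElem!_pos line i (by omega)]
    have e : 1 + i = i + 1 := Nat.add_comm 1 i
    simp only [e]

-- B = true iff all adjacent differences lie in [1,3] or all lie in [-3,-1] (nonempty diff list)
theorem B_iff (line : List Int) (h : 2 ≤ line.length) :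
    isGoodLine_alt line = true ↔
      ((∀ i : Nat, i + 1 < line.length → 1 ≤ (getElem! line (i+1)) - (getElem! line (i)) ∧ (getElem! line (i+1)) - (getElem! line (i)) ≤ 3) ∨
       (∀ i : Nat, i + 1 < line.length → -3 ≤ (getElem! line (i+1)) - (getElem! line (i)) ∧ (getElem! line (i+1)) - (getElem! line (i)) ≤ -1)) := by
  unfold isGoodLine_alt
  set diffs := (line.zip (PySem.List.slice line (some 1) none)).map (fun p => p.2 - p.1) with hdiffs
  have hne : diffs ≠ [] := by
    intro hnil
    have hmem : (getElem! line (1)) - (getElem! line (0)) ∈ diffs := by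
      rw [hdiffs, mem_diffs]; exact ⟨0, by omega, rfl⟩
    rw [hnil] at hmem
    simp at hmem
  obtain ⟨lo, hlo⟩ : ∃ lo, PySem.List.min? diffs (fun x => x) = some lo := by
    cases hm : PySem.List.min? diffs (fun x => x) with
    | none => exact absurd ((PySem.List.min?_eq_none_iff _ _).mp hm) hne
    | some lo => exact ⟨lo, rfl⟩
  obtain ⟨hi', hhi⟩ : ∃ hi', PySem.List.max? diffs (fun x => x) = some hi' := by
    cases hm : PySem.List.max? diffs (fun x => x) with
    | none => exact absurd ((PySem.List.max?_eq_none_iff _ _).mp hm) hne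
    | some hi' => exact ⟨hi', rfl⟩
  show (match PySem.List.min? diffs (fun x => x), PySem.List.max? diffs (fun x => x) with
        | some lo, some hi => decide ((1 ≤ lo ∧ hi ≤ 3) ∨ (-3 ≤ lo ∧ hi ≤ -1))
        | _, _ => false) = true ↔ _
  rw [hlo, hhi]
  simp only [decide_eq_true_eq]
  have hlomem := PySem.List.min?_mem hlo
  have hhimem := PySem.List.max?_mem hhi
  have hlomin := PySem.List.min?_isMin hlo
  have hhimax := PySem.List.max?_isMax hhi
  constructor
  · rintro (⟨h1, h3⟩ | ⟨h1, h3⟩)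
    · left
      intro i hilt
      have hmem : (getElem! line (i+1)) - (getElem! line (i)) ∈ diffs := by rw [hdiffs, mem_diffs]; exact ⟨i, hilt, rfl⟩
      exact ⟨le_trans h1 (hlomin _ hmem), le_trans (hhimax _ hmem) h3⟩
    · right
      intro i hilt
      have hmem : (getElem! line (i+1)) - (getElem! line (i)) ∈ diffs := by rw [hdiffs, mem_diffs]; exact ⟨i, hilt, rfl⟩
      exact ⟨le_trans h1 (hlomin _ hmem), le_trans (hhimax _ hmem) h3⟩
  · intro hall
    have hP : ∀ d ∈ diffs, (1 ≤ d ∧ d ≤ 3) ∨ (-3 ≤ d ∧ d ≤ -1) := by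
      intro d hd
      rw [hdiffs, mem_diffs] at hd
      obtain ⟨i, hilt, rfl⟩ := hd
      rcases hall with hall | hall
      · exact Or.inl (hall i hilt)
      · exact Or.inr (hall i hilt)
    rcases hall with hall | hall
    · left
      constructor
      · have := hP lo hlomem
        rw [hdiffs, mem_diffs] at hlomem
        obtain ⟨i, hilt, hlo'⟩ := hlomem
        have := hall i hilt; omega
      · have := hP hi' hhimem
        rw [hdiffs, mem_diffs] at hhimem
        obtain ⟨i, hilt, hhi'⟩ := hhimem
        have := hall i hilt; omega
    · right
      constructor
      · have := hP lo hlomem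
        rw [hdiffs, mem_diffs] at hlomem
        obtain ⟨i, hilt, hlo'⟩ := hlomem
        have := hall i hilt; omega
      · have := hP hi' hhimem
        rw [hdiffs, mem_diffs] at hhimem
        obtain ⟨i, hilt, hhi'⟩ := hhimem
        have := hall i hilt; omega

-- ===== VERDICT (by name: the statement is the Claim_ definition above) =====
theorem isGoodLine_spec : Claim_equal_isGoodLine := by
  intro line _ hpre
  unfold Spec_isGoodLine
  rw [Bool.eq_iff_iff, A_iff line hpre, B_iff line hpre]
  constructor
  · intro hA
    by_cases hsign : (getElem! line (1)) - (getElem! line (0)) < 0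
    · right
      intro i hi
      obtain ⟨⟨ha1, ha3⟩, hsg⟩ := hA i hi
      have hd : (getElem! line (i+1)) - (getElem! line (i)) < 0 := by
        have hdec : decide ((getElem! line (i+1)) - (getElem! line (i)) < 0) = true := by
          rw [hsg]; exact decide_eq_true hsign
        exact of_decide_eq_true hdec
      rw [abs_of_neg hd] at ha1 ha3
      omega
    · left
      intro i hi
      obtain ⟨⟨ha1, ha3⟩, hsg⟩ := hA i hi
      have hd : ¬ ((getElem! line (i+1)) - (getElem! line (i)) < 0) := by
        intro hlt
        have hdec : decide ((getElem! line (1)) - (getElem! line (0)) < 0) = true := by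
          rw [← hsg]; exact decide_eq_true hlt
        exact hsign (of_decide_eq_true hdec)
      rw [abs_of_nonneg (by omega)] at ha1 ha3
      omega
  · intro hB i hi
    rcases hB with hB | hB
    · obtain ⟨h1a, h1b⟩ := hB i hi
      obtain ⟨h0a, h0b⟩ := hB 0 (by omega)
      simp only [Nat.zero_add] at h0a h0b
      refine ⟨⟨?_, ?_⟩, ?_⟩
      · rw [abs_of_nonneg (by omega)]; omega
      · rw [abs_of_nonneg (by omega)]; omega
      · have e1 : ¬ ((getElem! line (i+1)) - (getElem! line (i)) < 0) := by omega
        have e0 : ¬ ((getElem! line (1)) - (getElem! line (0)) < 0) := by omega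
        rw [decide_eq_false e1, decide_eq_false e0]
    · obtain ⟨h1a, h1b⟩ := hB i hi
      obtain ⟨h0a, h0b⟩ := hB 0 (by omega)
      simp only [Nat.zero_add] at h0a h0b
      refine ⟨⟨?_, ?_⟩, ?_⟩
      · rw [abs_of_nonpos (by omega)]; omega
      · rw [abs_of_nonpos (by omega)]; omega
      · have e1 : (getElem! line (i+1)) - (getElem! line (i)) < 0 := by omega
        have e0 : (getElem! line (1)) - (getElem! line (0)) < 0 := by omega
        rw [decide_eq_true e1, decide_eq_true e0]
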